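-- pv_equiv track=rewrite | github.com/wlkaqw/python | 字符串交集.py | str_intersection_with_duplicates
-- ===== SOURCE A (Python) =====
-- from collections import Counter
--
-- def str_intersection_with_duplicates(s1, s2, keep_order=True):
--     """
--     求两个字符串的交集（保留重复字符，取最小出现次数）
--     :param s1: 第一个字符串
--     :param s2: 第二个字符串
--     :param keep_order: 是否按s1的字符顺序返回（False则按字符排序）
--     :return: 交集字符串
--     """
--     # 统计字符频率
--     count1 = Counter(s1) #Counter('aabcc')＝Counter({'a':2,'c':2,'b':1})
--     count2 = Counter(s2)
--
--     # 取交集（每个字符保留小出现次数）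
--     inter_count = count1 & count2
--
--     if not inter_count:
--         return ""
--
--     # 按s1的顺序拼接（保留重复）
--     if keep_order:
--         result = []
--         temp_count = inter_count.copy()  # 临时计数，避免修改原Counter
--         for char in s1:
--             if temp_count.get(char, 0) > 0:
--                 result.append(char)
--                 temp_count[char] -= 1
--         return ''.join(result)
--     # 按字符排序后拼接
--     else:
--         return ''.join([char * cnt for char, cnt in sorted(inter_count.items())])
-- ===== SOURCE B (Python) =====
-- def str_intersection_with_duplicates(s1, s2, keep_order=True):
--     # keep the i-th character of s1 iff its occurrence rank so far fits within s2's supply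
--     cs1, cs2 = list(s1), list(s2)
--     kept = [c for i, c in enumerate(cs1) if cs1[:i + 1].count(c) <= cs2.count(c)]
--     return ''.join(kept if keep_order else sorted(kept))
-- ===== Notes on version B (the rewrite author's own statement) =====
-- stated objective: simpler
-- what changed: B replaces A's whole pipeline (two Counters, a Counter-intersection multiset, and a replay loop that decrements a mutable temp counter) by one stateless comprehension: keep s1[i] iff s1[:i+1].count(c) <= s2.count(c), i.e. the occurrence's rank fits s2's supply; the unordered branch is just sorted() of that same kept list, so no counter or intersection is ever built.
import Mathlib
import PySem

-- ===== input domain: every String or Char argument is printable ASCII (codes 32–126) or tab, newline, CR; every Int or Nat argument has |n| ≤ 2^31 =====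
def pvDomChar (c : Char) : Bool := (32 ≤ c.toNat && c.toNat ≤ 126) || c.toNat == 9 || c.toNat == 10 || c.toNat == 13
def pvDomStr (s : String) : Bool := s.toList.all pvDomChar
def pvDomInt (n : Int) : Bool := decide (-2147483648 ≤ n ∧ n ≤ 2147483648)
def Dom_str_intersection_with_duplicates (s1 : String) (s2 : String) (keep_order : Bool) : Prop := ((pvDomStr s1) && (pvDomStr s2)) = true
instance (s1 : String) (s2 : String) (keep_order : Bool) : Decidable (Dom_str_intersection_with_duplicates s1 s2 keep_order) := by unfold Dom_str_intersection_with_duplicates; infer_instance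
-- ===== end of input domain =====

-- B is simpler: no Counter, no intersection, no mutable budget — a single stateless
-- comprehension keeps s1[i] iff its occurrence rank so far fits within s2's supply
-- (s1[:i+1].count(c) <= s2.count(c)); the unordered branch just sorts that result.

-- ===== PORT A =====
def str_intersection_with_duplicates (s1 : String) (s2 : String) (keep_order : Bool) : String :=
  let count1 := PySem.Dict.counter s1.toList
  let count2 := PySem.Dict.counter s2.toList
  -- count1 & count2: iterate count1's items, keep min(count, count2[k]) when positive
  let inter := count1.items.foldl (fun (d : PySem.Dict Char Int) kv =>
      let m := min kv.2 (count2.getD kv.1 0)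
      if 0 < m then d.insert kv.1 m else d) PySem.Dict.empty
  if inter.items = [] then ""
  else if keep_order then
    let res := s1.toList.foldl
      (fun (st : PySem.Dict Char Int × List Char) c =>
        if 0 < st.1.getD c 0 then (st.1.insert c (st.1.getD c 0 - 1), st.2 ++ [c]) else st)
      (inter, [])
    String.ofList res.2
  else
    String.ofList ((PySem.List.sorted2 inter.items (fun p => p.1) (fun p => p.2) false).foldl
      (fun acc kv => acc ++ PySem.List.pyRepeat [kv.1] kv.2) [])

-- ===== PORT B =====
def str_intersection_with_duplicates_alt (s1 : String) (s2 : String) (keep_order : Bool) : String :=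
  let cs1 := s1.toList
  let cs2 := s2.toList
  -- [c for i, c in enumerate(cs1) if cs1[:i+1].count(c) <= cs2.count(c)]
  let kept := ((PySem.List.enumerate cs1).filter
      (fun ic => decide ((PySem.List.slice cs1 none (some (ic.1 + 1))).count ic.2 ≤ cs2.count ic.2))).map
      (fun ic => ic.2)
  String.ofList (if keep_order then kept else PySem.List.sorted kept (fun c => c) false)

-- ===== PRECONDITION & SPEC =====
def Spec_str_intersection_with_duplicates (s1 : String) (s2 : String) (keep_order : Bool) (out : String) : Prop := out = str_intersection_with_duplicates_alt s1 s2 keep_order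
instance (s1 : String) (s2 : String) (keep_order : Bool) (out : String) : Decidable (Spec_str_intersection_with_duplicates s1 s2 keep_order out) := by unfold Spec_str_intersection_with_duplicates; infer_instance

-- ===== CLAIM (what is proved, stated in full; the proofs are below) =====
def Claim_equal_str_intersection_with_duplicates : Prop := ∀ (s1 : String) (s2 : String) (keep_order : Bool), Dom_str_intersection_with_duplicates s1 s2 keep_order → Spec_str_intersection_with_duplicates s1 s2 keep_order (str_intersection_with_duplicates s1 s2 keep_order)

-- ===== LEMMAS AND PROOFS =====

-- the abstract greedy take (A's keep_order loop): budget f, take a char while its budget is positive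
def pvUpd (f : Char → Int) (c : Char) : Char → Int := fun x => if x = c then f c - 1 else f x

def pvGreedy (f : Char → Int) : List Char → List Char
  | [] => []
  | c :: rest => if 0 < f c then c :: pvGreedy (pvUpd f c) rest else pvGreedy f rest

theorem pv_A_loop (cs : List Char) (d : PySem.Dict Char Int) (acc : List Char) :
    (cs.foldl (fun (st : PySem.Dict Char Int × List Char) c =>
        if 0 < st.1.getD c 0 then (st.1.insert c (st.1.getD c 0 - 1), st.2 ++ [c]) else st)
      (d, acc)).2 = acc ++ pvGreedy (fun c => d.getD c 0) cs := by
  induction cs generalizing d acc with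
  | nil => simp [pvGreedy]
  | cons c rest ih =>
    by_cases h : 0 < d.getD c 0
    · have hb : (fun x => (d.insert c (d.getD c 0 - 1)).getD x 0) = pvUpd (fun x => d.getD x 0) c := by
        funext x
        simp [PySem.Dict.getD_insert, pvUpd]
      simp only [List.foldl_cons, if_pos h, pvGreedy, ih, hb]
      simp
    · simp only [List.foldl_cons, if_neg h, pvGreedy, ih, if_neg h]

theorem pv_greedy_nonpos (cs : List Char) (f : Char → Int) (h : ∀ c, f c ≤ 0) :
    pvGreedy f cs = [] := by
  induction cs generalizing f with
  | nil => rfl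
  | cons c rest ih =>
    have hc := h c
    rw [pvGreedy, if_neg (by omega)]
    exact ih _ h

-- B's comprehension as structural recursion over s1 carrying the scanned prefix
def pvFilt (g : Char → Nat) (pre : List Char) : List Char → List Char
  | [] => []
  | c :: rest =>
      if pre.count c + 1 ≤ g c then c :: pvFilt g (pre ++ [c]) rest
      else pvFilt g (pre ++ [c]) rest

-- the enumerate/slice comprehension of port B is pvFilt
theorem pv_enum_filter (g : Char → Nat) (full : List Char) :
    ∀ (cs pre : List Char), full = pre ++ cs →
      ((PySem.List.enumerate cs (pre.length : Int)).filter
          (fun ic => decide ((PySem.List.slice full none (some (ic.1 + 1))).count ic.2 ≤ g ic.2))).map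
        (fun ic => ic.2)
      = pvFilt g pre cs := by
  intro cs
  induction cs with
  | nil => intro pre _; simp [PySem.List.enumerate_nil, pvFilt]
  | cons c rest ih =>
    intro pre hfull
    rw [PySem.List.enumerate_cons]
    have hsl : PySem.List.slice full none (some ((pre.length : Int) + 1)) = pre ++ [c] := by
      have h0 : (0 : Int) ≤ (pre.length : Int) + 1 := by positivity
      rw [PySem.List.slice_to full h0, hfull]
      have ht : ((pre.length : Int) + 1).toNat = pre.length + 1 := by omega
      rw [ht, List.take_append]
      simp
    have hcnt : (pre ++ [c]).count c = pre.count c + 1 := by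
      simp [List.count_append]
    have hstep : ((pre ++ [c]).length : Int) = (pre.length : Int) + 1 := by
      simp
    have htail := ih (pre ++ [c]) (by rw [hfull, List.append_assoc]; rfl)
    rw [hstep] at htail
    by_cases hk : pre.count c + 1 ≤ g c
    · rw [List.filter_cons_of_pos (by simp [hsl, hcnt, hk])]
      simp only [List.map_cons]
      rw [htail]
      simp [pvFilt, hk]
    · rw [List.filter_cons_of_neg (by simp [hsl, hcnt, hk])]
      rw [htail]
      simp [pvFilt, hk]

-- greedy with budget f equals the stateless prefix-rank filter with supply g
theorem pv_greedy_eq_filt :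
    ∀ (cs pre : List Char) (f : Char → Int) (g : Char → Nat),
      (∀ x, min ((cs.count x : Int)) (max (f x) 0)
            = min ((cs.count x : Int)) (max ((g x : Int) - (pre.count x : Int)) 0)) →
      pvGreedy f cs = pvFilt g pre cs := by
  intro cs
  induction cs with
  | nil => intro pre f g _; rfl
  | cons c rest ih =>
    intro pre f g h
    have hc := h c
    rw [List.count_cons_self] at hc
    push_cast at hc
    by_cases hk : pre.count c + 1 ≤ g c
    · have hf : 0 < f c := by
        rw [min_def, min_def] at hc
        rw [max_def, max_def] at hc
        have := Int.natCast_nonneg (rest.count c)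
        split_ifs at hc <;> omega
      rw [pvGreedy, if_pos hf, pvFilt, if_pos hk]
      refine congrArg _ (ih _ _ _ ?_)
      intro x
      by_cases hx : x = c
      · subst hx
        have hcnt : (pre ++ [x]).count x = pre.count x + 1 := by simp [List.count_append]
        rw [hcnt]
        simp only [pvUpd, if_pos rfl]
        push_cast
        rw [min_def, min_def] at hc ⊢
        rw [max_def, max_def] at hc ⊢
        split_ifs at hc ⊢ <;> omega
      · have hx' : ¬c = x := fun he => hx he.symm
        have h1 : (c :: rest).count x = rest.count x := by simp [List.count_cons, hx']
        have h2 : (pre ++ [c]).count x = pre.count x := by simp [List.count_append, hx']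
        have := h x
        rw [h1] at this
        rw [h2]
        simpa [pvUpd, hx] using this
    · have hf : ¬ 0 < f c := by
        rw [min_def, min_def] at hc
        rw [max_def, max_def] at hc
        have := Int.natCast_nonneg (rest.count c)
        split_ifs at hc <;> omega
      rw [pvGreedy, if_neg hf, pvFilt, if_neg hk]
      refine ih _ _ _ ?_
      intro x
      by_cases hx : x = c
      · subst hx
        have hcnt : (pre ++ [x]).count x = pre.count x + 1 := by simp [List.count_append]
        rw [hcnt]
        push_cast
        rw [min_def, min_def] at hc ⊢
        rw [max_def, max_def] at hc ⊢
        split_ifs at hc ⊢ <;> omega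
      · have hx' : ¬c = x := fun he => hx he.symm
        have h1 : (c :: rest).count x = rest.count x := by simp [List.count_cons, hx']
        have h2 : (pre ++ [c]).count x = pre.count x := by simp [List.count_append, hx']
        have := h x
        rw [h1] at this
        rw [h2]
        exact this

-- how many copies of x the greedy take keeps
theorem pv_count_greedy (x : Char) :
    ∀ (cs : List Char) (f : Char → Int),
      ((pvGreedy f cs).count x : Int) = min ((cs.count x : Int)) (max (f x) 0) := by
  intro cs
  induction cs with
  | nil => intro f; simp [pvGreedy]
  | cons c rest ih =>
    intro f
    by_cases hf : 0 < f c
    · rw [pvGreedy, if_pos hf]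
      by_cases hx : x = c
      · subst hx
        rw [List.count_cons_self, List.count_cons_self]
        have h := ih (pvUpd f x)
        simp only [pvUpd, if_pos rfl] at h
        push_cast
        simp only [min_def, max_def] at h ⊢
        split_ifs at h ⊢ <;> omega
      · have h := ih (pvUpd f c)
        simp only [pvUpd, if_neg hx] at h
        rw [List.count_cons_of_ne (fun he => hx he.symm), List.count_cons_of_ne (fun he => hx he.symm)]
        exact h
    · rw [pvGreedy, if_neg hf]
      by_cases hx : x = c
      · subst hx
        have h := ih f
        rw [List.count_cons_self]
        push_cast
        simp only [min_def, max_def] at h ⊢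
        split_ifs at h ⊢ <;> omega
      · rw [List.count_cons_of_ne (fun he => hx he.symm)]
        exact ih f

-- items of the Counter-intersection fold
theorem pv_interfold_items (p : Char → Bool) (v : Char → Int) :
    ∀ (ks : List Char) (d : PySem.Dict Char Int), ks.Nodup →
      (∀ k ∈ ks, d.contains k = false) →
      (ks.foldl (fun d k => if p k then d.insert k (v k) else d) d).items
        = d.items ++ (ks.filter p).map (fun k => (k, v k)) := by
  intro ks
  induction ks with
  | nil => intro d _ _; simp
  | cons k rest ih =>
    intro d hnd hfr
    have hk : d.contains k = false := hfr k (by simp)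
    have hrest : ∀ k' ∈ rest, (if p k then d.insert k (v k) else d).contains k' = false := by
      intro k' hk'
      have hne : k' ≠ k := fun he => (List.nodup_cons.mp hnd).1 (he ▸ hk')
      by_cases hp : p k
      · simp [hp, PySem.Dict.contains_insert, hne, hfr k' (by simp [hk'])]
      · simp [hp, hfr k' (by simp [hk'])]
    by_cases hp : p k
    · simp only [if_pos hp] at hrest
      simp only [List.foldl_cons, if_pos hp]
      rw [ih _ (List.nodup_cons.mp hnd).2 hrest]
      rw [PySem.Dict.items_insert_of_not_contains _ _ hk]
      simp [hp]
    · simp only [if_neg hp] at hrest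
      simp only [List.foldl_cons, if_neg hp]
      rw [ih _ (List.nodup_cons.mp hnd).2 hrest]
      simp [hp]

-- lookup in the Counter-intersection fold
theorem pv_interfold_getD (p : Char → Bool) (v : Char → Int) (c : Char) :
    ∀ (ks : List Char) (d : PySem.Dict Char Int), ks.Nodup →
      (ks.foldl (fun d k => if p k then d.insert k (v k) else d) d).getD c 0
        = if c ∈ ks ∧ p c then v c else d.getD c 0 := by
  intro ks
  induction ks with
  | nil => intro d _; simp
  | cons k rest ih =>
    intro d hnd
    simp only [List.foldl_cons]
    rw [ih _ (List.nodup_cons.mp hnd).2]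
    by_cases hmem : c ∈ rest
    · have hne : c ≠ k := fun he => (List.nodup_cons.mp hnd).1 (he ▸ hmem)
      by_cases hp : p c
      · simp [hmem, hp]
      · by_cases hpk : p k
        · simp [hmem, hp, hpk, PySem.Dict.getD_insert, hne]
        · simp [hmem, hp, hpk]
    · by_cases hck : c = k
      · subst hck
        by_cases hp : p c
        · simp [hmem, hp, PySem.Dict.getD_insert]
        · simp [hmem, hp]
      · by_cases hpk : p k
        · simp [hmem, hck, PySem.Dict.getD_insert, hpk]
        · simp [hmem, hck, hpk]

-- insertBy only looks at the comparator on (new element, list elements)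
theorem pv_insertBy_congr {α : Type} (f g : α → α → Bool) (x : α) (l : List α)
    (h : ∀ y ∈ l, f x y = g x y) : PySem.List.insertBy f x l = PySem.List.insertBy g x l := by
  induction l with
  | nil => rfl
  | cons y ys ih =>
    simp only [PySem.List.insertBy]
    rw [h y (by simp)]
    by_cases hb : g x y
    · simp [hb]
    · simp [hb, ih (fun z hz => h z (by simp [hz]))]

theorem pv_foldl_insertBy_congr {α : Type} (f g : α → α → Bool) (s : List α)
    (hs : ∀ a ∈ s, ∀ b ∈ s, f a b = g a b) :
    ∀ (l acc : List α), (∀ a ∈ l, a ∈ s) → (∀ b ∈ acc, b ∈ s) →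
      l.foldl (fun acc x => PySem.List.insertBy f x acc) acc
        = l.foldl (fun acc x => PySem.List.insertBy g x acc) acc := by
  intro l
  induction l with
  | nil => intro acc _ _; rfl
  | cons x xs ih =>
    intro acc hl hacc
    have hx : x ∈ s := hl x (by simp)
    simp only [List.foldl_cons]
    rw [pv_insertBy_congr f g x acc (fun y hy => hs x hx y (hacc y hy))]
    exact ih _ (fun a ha => hl a (by simp [ha]))
      (fun b hb => ((PySem.List.mem_insertBy g x b acc).mp hb).elim (fun he => he ▸ hx) (fun hbm => hacc b hbm))

-- with pairwise-distinct first components, a lexicographic pair sort is a sort by fst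
theorem pv_sorted2_eq_sorted (l : List (Char × Int)) (hnd : (l.map Prod.fst).Nodup) :
    PySem.List.sorted2 l (fun p => p.1) (fun p => p.2) false
      = PySem.List.sorted l (fun p => p.1) false := by
  unfold PySem.List.sorted2 PySem.List.sorted
  simp only [if_neg (by decide : ¬ (false = true))]
  refine pv_foldl_insertBy_congr _ _ l ?_ l [] (fun a ha => ha) (by simp)
  intro a ha b hb
  rcases lt_trichotomy a.1 b.1 with hlt | heq | hgt
  · simp [hlt, not_lt_of_gt hlt]
  · have : a = b := List.inj_on_of_nodup_map hnd ha hb heq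
    subst this
    simp
  · simp [hgt, not_lt_of_gt hgt, asymm hgt]

def pvM (l1 l2 : List Char) (k : Char) : Int := min ((l1.count k : Int)) ((l2.count k : Int))

def pvP (l1 l2 : List Char) (k : Char) : Bool := decide (0 < pvM l1 l2 k)

def pvInter (l1 l2 : List Char) : PySem.Dict Char Int :=
  (PySem.Set.ofList l1).foldl
    (fun d k => if pvP l1 l2 k then d.insert k (pvM l1 l2 k) else d) PySem.Dict.empty

theorem pv_items_pvInter (l1 l2 : List Char) :
    (pvInter l1 l2).items
      = ((PySem.Set.ofList l1).filter (pvP l1 l2)).map (fun k => (k, pvM l1 l2 k)) := by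
  unfold pvInter
  rw [pv_interfold_items (pvP l1 l2) (pvM l1 l2) _ _ (PySem.Set.nodup_ofList l1)
    (by intro k _; simp)]
  simp [PySem.Dict.empty]

theorem pv_getD_pvInter (l1 l2 : List Char) (c : Char) :
    (pvInter l1 l2).getD c 0
      = if c ∈ PySem.Set.ofList l1 ∧ pvP l1 l2 c then pvM l1 l2 c else 0 := by
  unfold pvInter
  rw [pv_interfold_getD (pvP l1 l2) (pvM l1 l2) c _ _ (PySem.Set.nodup_ofList l1)]
  simp

theorem pv_budget (l1 l2 : List Char) (c : Char) :
    (pvInter l1 l2).getD c 0 = min ((l1.count c : Int)) ((l2.count c : Int)) := by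
  rw [pv_getD_pvInter]
  by_cases hmem : c ∈ PySem.Set.ofList l1
  · by_cases hpc : pvP l1 l2 c
    · simp [hmem, hpc, pvM]
    · have hnp : ¬ 0 < pvM l1 l2 c := by simpa [pvP] using hpc
      simp only [hmem, hpc, true_and, and_false, Bool.false_eq_true, if_false]
      unfold pvM at hnp
      rw [min_def] at hnp ⊢
      split_ifs at hnp ⊢ <;> omega
  · have hc1 : l1.count c = 0 := by
      rw [List.count_eq_zero]
      exact fun hmem' => hmem ((PySem.Set.mem_ofList l1 c).mpr hmem')
    simp only [hmem, false_and, if_false, hc1, Nat.cast_zero]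
    rw [min_def]
    split_ifs <;> omega

-- count of a char in the concatenation of per-char replicate blocks
theorem pv_count_flat (y : Char) :
    ∀ (K : List Char) (m : Char → Nat), K.Nodup →
      ((K.flatMap (fun c => List.replicate (m c) c)).count y : Int)
        = if y ∈ K then (m y : Int) else 0 := by
  intro K
  induction K with
  | nil => intro m _; simp
  | cons k rest ih =>
    intro m hnd
    rw [List.flatMap_cons, List.count_append]
    push_cast
    rw [ih m (List.nodup_cons.mp hnd).2]
    by_cases hy : y = k
    · subst hy
      have hnin : y ∉ rest := (List.nodup_cons.mp hnd).1
      simp [List.count_replicate, hnin]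
    · have hky : ¬ k = y := fun he => hy he.symm
      simp [List.count_replicate, hy, hky]

-- the concatenation of replicate blocks over a strictly increasing char list is sorted
theorem pv_pairwise_flat :
    ∀ (K : List Char) (m : Char → Nat), K.Pairwise (· < ·) →
      (K.flatMap (fun c => List.replicate (m c) c)).Pairwise (fun a b => a ≤ b) := by
  intro K
  induction K with
  | nil => intro m _; simp
  | cons k rest ih =>
    intro m hp
    rw [List.flatMap_cons]
    rw [List.pairwise_append]
    refine ⟨?_, ih m (List.pairwise_cons.mp hp).2, ?_⟩
    · exact List.pairwise_replicate_of_refl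
    · intro a ha b hb
      have ha' : a = k := List.eq_of_mem_replicate ha
      obtain ⟨c, hc, hbc⟩ := List.mem_flatMap.mp hb
      have hb' : b = c := List.eq_of_mem_replicate hbc
      subst ha' hb'
      exact le_of_lt ((List.pairwise_cons.mp hp).1 _ hc)

theorem pv_main (s1 s2 : String) (keep_order : Bool) :
    str_intersection_with_duplicates s1 s2 keep_order
      = str_intersection_with_duplicates_alt s1 s2 keep_order := by
  have hstep : str_intersection_with_duplicates s1 s2 keep_order =
      (if (pvInter s1.toList s2.toList).items = [] then ""
       else if keep_order then
         String.ofList ((s1.toList.foldl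
           (fun (st : PySem.Dict Char Int × List Char) c =>
             if 0 < st.1.getD c 0 then (st.1.insert c (st.1.getD c 0 - 1), st.2 ++ [c]) else st)
           ((pvInter s1.toList s2.toList), [])).2)
       else
         String.ofList ((PySem.List.sorted2 (pvInter s1.toList s2.toList).items
             (fun p => p.1) (fun p => p.2) false).foldl
           (fun acc kv => acc ++ PySem.List.pyRepeat [kv.1] kv.2) [])) := by
    unfold str_intersection_with_duplicates pvInter pvP pvM
    simp only [PySem.Dict.items_counter, List.foldl_map, PySem.Dict.getD_counter,
      decide_eq_true_eq]
  have hkept : ((PySem.List.enumerate s1.toList).filter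
      (fun ic => decide ((PySem.List.slice s1.toList none (some (ic.1 + 1))).count ic.2
        ≤ s2.toList.count ic.2))).map (fun ic => ic.2)
      = pvFilt (fun c => s2.toList.count c) [] s1.toList := by
    have h := pv_enum_filter (fun c => s2.toList.count c) s1.toList s1.toList []
      (List.nil_append _).symm
    simpa using h
  have hG : pvFilt (fun c => s2.toList.count c) [] s1.toList
      = pvGreedy (fun c => (pvInter s1.toList s2.toList).getD c 0) s1.toList := by
    refine (pv_greedy_eq_filt s1.toList [] _ _ ?_).symm
    intro x
    rw [pv_budget]
    simp only [List.count_nil, Nat.cast_zero]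
    simp only [min_def, max_def]
    split_ifs <;> omega
  have halt : str_intersection_with_duplicates_alt s1 s2 keep_order =
      String.ofList (if keep_order
        then pvGreedy (fun c => (pvInter s1.toList s2.toList).getD c 0) s1.toList
        else PySem.List.sorted
          (pvGreedy (fun c => (pvInter s1.toList s2.toList).getD c 0) s1.toList)
          (fun c => c) false) := by
    unfold str_intersection_with_duplicates_alt
    simp only []
    rw [hkept, hG]
  rw [hstep, halt]
  by_cases hempty : (pvInter s1.toList s2.toList).items = []
  · rw [if_pos hempty]
    have hfilter : (PySem.Set.ofList s1.toList).filter (pvP s1.toList s2.toList) = [] := by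
      have h := pv_items_pvInter s1.toList s2.toList
      rw [hempty] at h
      exact List.map_eq_nil_iff.mp h.symm
    have hnop : ∀ c ∈ PySem.Set.ofList s1.toList, pvP s1.toList s2.toList c = false := by
      intro c hc
      by_contra hne
      have hpc : pvP s1.toList s2.toList c = true := by
        cases h : pvP s1.toList s2.toList c
        · exact absurd h hne
        · rfl
      have : c ∈ (PySem.Set.ofList s1.toList).filter (pvP s1.toList s2.toList) :=
        List.mem_filter.mpr ⟨hc, hpc⟩
      rw [hfilter] at this
      exact absurd this (List.not_mem_nil)
    have hbud0 : ∀ c, (pvInter s1.toList s2.toList).getD c 0 = 0 := by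
      intro c
      rw [pv_getD_pvInter]
      by_cases hmem : c ∈ PySem.Set.ofList s1.toList
      · simp [hmem, hnop c hmem]
      · simp [hmem]
    have hGnil : pvGreedy (fun c => (pvInter s1.toList s2.toList).getD c 0) s1.toList = [] :=
      pv_greedy_nonpos _ _ (fun c => (hbud0 c).le)
    rw [hGnil]
    cases keep_order <;> rfl
  · rw [if_neg hempty]
    cases keep_order with
    | true =>
      rw [if_pos rfl, if_pos rfl, pv_A_loop, List.nil_append]
    | false =>
      rw [if_neg (by simp), if_neg (by simp)]
      have hfnd : ((pvInter s1.toList s2.toList).items.map Prod.fst).Nodup := by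
        rw [pv_items_pvInter]
        simp only [List.map_map]
        have hcomp : (Prod.fst ∘ fun k => (k, pvM s1.toList s2.toList k)) = id := rfl
        rw [hcomp, List.map_id]
        exact (PySem.Set.nodup_ofList s1.toList).filter _
      rw [pv_sorted2_eq_sorted _ hfnd]
      set K := PySem.List.sorted ((PySem.Set.ofList s1.toList).filter (pvP s1.toList s2.toList))
        (fun c => c) false with hK
      have hKperm : K.Perm ((PySem.Set.ofList s1.toList).filter (pvP s1.toList s2.toList)) :=
        PySem.List.sorted_perm _ _ _
      have hKnd : K.Nodup := hKperm.nodup_iff.mpr ((PySem.Set.nodup_ofList s1.toList).filter _)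
      have hKlt : K.Pairwise (fun a b => a < b) := by
        have hle := PySem.List.sorted_pairwise
          ((PySem.Set.ofList s1.toList).filter (pvP s1.toList s2.toList)) (fun c => c)
        rw [← hK] at hle
        exact (hle.and hKnd).imp (fun h => lt_of_le_of_ne h.1 h.2)
      have hsorted : PySem.List.sorted (pvInter s1.toList s2.toList).items (fun p => p.1) false
          = K.map (fun c => (c, pvM s1.toList s2.toList c)) := by
        apply PySem.List.sorted_eq_of_perm_of_pairwise_lt
        · rw [pv_items_pvInter]
          exact hKperm.map _
        · rw [List.pairwise_map]
          exact hKlt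
      rw [hsorted, PySem.List.foldl_append_eq_flatMap, List.nil_append, List.flatMap_map]
      have hfun : (fun a => PySem.List.pyRepeat [((fun c => (c, pvM s1.toList s2.toList c)) a).1]
            ((fun c => (c, pvM s1.toList s2.toList c)) a).2)
          = fun c => List.replicate ((pvM s1.toList s2.toList c).toNat) c := by
        funext c
        simp [PySem.List.pyRepeat_singleton]
      rw [hfun]
      refine congrArg String.ofList ?_
      set G := pvGreedy (fun c => (pvInter s1.toList s2.toList).getD c 0) s1.toList with hGdef
      have hcnt : ∀ y : Char,
          (K.flatMap (fun c => List.replicate ((pvM s1.toList s2.toList c).toNat) c)).count y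
            = G.count y := by
        intro y
        have hflat := pv_count_flat y K (fun c => (pvM s1.toList s2.toList c).toNat) hKnd
        have hg := pv_count_greedy y s1.toList (fun c => (pvInter s1.toList s2.toList).getD c 0)
        rw [pv_budget] at hg
        by_cases hyK : y ∈ K
        · have hy1 : y ∈ s1.toList ∧ 0 < pvM s1.toList s2.toList y := by
            have h1 := (PySem.List.mem_sorted _ _ _ y).mp hyK
            have h2 := List.mem_filter.mp h1
            exact ⟨(PySem.Set.mem_ofList _ _).mp h2.1, by simpa [pvP] using h2.2⟩
          rw [if_pos hyK] at hflat
          have hm : (((pvM s1.toList s2.toList y).toNat : Nat) : Int)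
              = pvM s1.toList s2.toList y :=
            Int.toNat_of_nonneg (le_of_lt hy1.2)
          have hfin : ((K.flatMap
              (fun c => List.replicate ((pvM s1.toList s2.toList c).toNat) c)).count y : Int)
              = (G.count y : Int) := by
            rw [hflat, hg, hm]
            unfold pvM
            simp only [min_def, max_def]
            split_ifs <;> omega
          exact_mod_cast hfin
        · rw [if_neg hyK] at hflat
          have hnot : ¬ (y ∈ s1.toList ∧ 0 < pvM s1.toList s2.toList y) := by
            intro hcon
            apply hyK
            rw [hK, PySem.List.mem_sorted]
            exact List.mem_filter.mpr
              ⟨(PySem.Set.mem_ofList _ _).mpr hcon.1, by simpa [pvP] using hcon.2⟩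
          have hfin : ((K.flatMap
              (fun c => List.replicate ((pvM s1.toList s2.toList c).toNat) c)).count y : Int)
              = (G.count y : Int) := by
            rw [hflat, hg]
            by_cases hmem : y ∈ s1.toList
            · have hple : pvM s1.toList s2.toList y ≤ 0 := by
                by_contra hcon
                exact hnot ⟨hmem, by omega⟩
              unfold pvM at hple
              simp only [min_def, max_def] at hple ⊢
              split_ifs at hple ⊢ <;> omega
            · have hz : s1.toList.count y = 0 := List.count_eq_zero.mpr hmem
              rw [hz]
              simp only [Nat.cast_zero, min_def, max_def]
              split_ifs <;> omega
          exact_mod_cast hfin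
      refine List.eq_of_perm_of_sorted (fun a b _ _ h1 h2 => le_antisymm h1 h2)
        (pv_pairwise_flat K _ hKlt)
        (by simpa using PySem.List.sorted_pairwise G (fun c => c))
        ((List.perm_iff_count.mpr hcnt).trans (PySem.List.sorted_perm G (fun c => c) false).symm)

-- ===== VERDICT (by name: the statement is the Claim_ definition above) =====
theorem str_intersection_with_duplicates_spec : Claim_equal_str_intersection_with_duplicates := by
  intro s1 s2 keep_order _
  unfold Spec_str_intersection_with_duplicates
  exact pv_main s1 s2 keep_order
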